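-- pv_equiv track=rewrite | github.com/ramizbelim/testing | Practical_1.py | practical_1
-- ===== SOURCE A (Python) =====
-- def practical_1(sentence):
--     sentence_strip = sentence.strip()
--     punc = 'aeiou,'
--     result = ""
--     for ele in sentence_strip:
--         if ele not in punc:
--             result += ele
--     string = [ele for ele in result.strip().split() if ele.isalnum()]
--     res = " ".join(string)
--     count_digit = 0
--     for digit in res:
--         if digit.isdigit():
--             count_digit +=1
--     return count_digit
-- ===== SOURCE B (Python) =====
-- def practical_1(sentence):
--     # One pass over the words: no global filtered string, no re-split/re-join.
--     drop = set('aeiou,')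
--     total = 0
--     for word in sentence.split():
--         cleaned = ''.join(ch for ch in word if ch not in drop)
--         if cleaned.isalnum():
--             total += sum(1 for ch in cleaned if ch.isdigit())
--     return total
-- ===== Notes on version B (the rewrite author's own statement) =====
-- stated objective: simpler
-- what changed: B fuses A's build-filtered-string / strip / re-split / filter / re-join / count pipeline into a single pass over sentence.split() with one running digit counter, never materialising the intermediate strings.
import Mathlib
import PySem

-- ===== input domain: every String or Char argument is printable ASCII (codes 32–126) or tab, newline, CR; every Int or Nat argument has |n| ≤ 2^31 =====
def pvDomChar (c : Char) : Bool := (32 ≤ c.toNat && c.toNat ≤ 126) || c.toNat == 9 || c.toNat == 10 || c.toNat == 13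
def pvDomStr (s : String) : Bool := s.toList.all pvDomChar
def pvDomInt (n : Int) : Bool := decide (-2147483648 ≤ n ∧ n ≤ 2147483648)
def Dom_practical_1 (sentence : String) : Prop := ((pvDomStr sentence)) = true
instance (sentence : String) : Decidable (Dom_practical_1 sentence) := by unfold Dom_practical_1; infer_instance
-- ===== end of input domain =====

-- B is a single pass over sentence.split() with one running counter, in place of A's
-- build-filtered-string / strip / re-split / filter / re-join / count-again pipeline (objective: simpler).

-- ===== PORT A =====
-- 'ele not in punc' tests a single character against the string 'aeiou,': exactly element membership.
def practical_1 (sentence : String) : Int :=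
  let sentence_strip := PySem.Chars.strip sentence.toList
  let punc := "aeiou,".toList
  let result := sentence_strip.foldl
    (fun acc ele => if !(punc.contains ele) then acc ++ [ele] else acc) []
  let string := (PySem.Chars.split₀ (PySem.Chars.strip result)).filter
    (fun ele => PySem.Chars.strIsalnum ele)
  let res := PySem.Chars.join " ".toList string
  res.foldl (fun acc digit => if PySem.Chars.isdigit digit then acc + 1 else acc) (0 : Int)

-- ===== PORT B =====
def practical_1_alt (sentence : String) : Int :=
  (PySem.Chars.split₀ sentence.toList).foldl
    (fun total word =>
      let cleaned := word.filter (fun ch => !(("aeiou,".toList).contains ch))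
      if PySem.Chars.strIsalnum cleaned then
        total + (cleaned.countP PySem.Chars.isdigit : Int)
      else total)
    0

-- ===== PRECONDITION & SPEC =====
def Spec_practical_1 (sentence : String) (out : Int) : Prop := out = practical_1_alt sentence
instance (sentence : String) (out : Int) : Decidable (Spec_practical_1 sentence out) := by unfold Spec_practical_1; infer_instance

-- ===== CLAIM (what is proved, stated in full; the proofs are below) =====
def Claim_equal_practical_1 : Prop := ∀ (sentence : String), Dom_practical_1 sentence → Spec_practical_1 sentence (practical_1 sentence)

-- ===== LEMMAS AND PROOFS =====

-- the character filter both versions apply ('not a vowel and not a comma')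
def pvKeep (c : Char) : Bool := !(("aeiou,".toList).contains c)

theorem pv_go_acc (s cur acc) : PySem.Chars.split₀.go s cur acc = acc.reverse ++ PySem.Chars.split₀.go s cur [] := by
  induction s generalizing cur acc with
  | nil => simp [PySem.Chars.split₀.go]; split <;> simp
  | cons c rest ih =>
      simp only [PySem.Chars.split₀.go]
      split
      · split
        · exact ih _ _
        · rw [ih [] [cur.reverse], ih [] (cur.reverse :: acc)]; simp
      · exact ih _ _

theorem pv_go_spaces (t) (h : ∀ c ∈ t, PySem.Chars.isspace c) (acc) :
    PySem.Chars.split₀.go t [] acc = acc.reverse := by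
  induction t generalizing acc with
  | nil => simp [PySem.Chars.split₀.go]
  | cons c rest ih =>
      simp only [PySem.Chars.split₀.go, h c (by simp), if_true, List.isEmpty_nil]
      exact ih (fun c hc => h c (by simp [hc])) acc

theorem pv_go_append_spaces (s t cur) (h : ∀ c ∈ t, PySem.Chars.isspace c) :
    PySem.Chars.split₀.go (s ++ t) cur [] = PySem.Chars.split₀.go s cur [] := by
  induction s generalizing cur with
  | nil =>
      simp only [List.nil_append]
      by_cases hc : cur.isEmpty
      · rw [List.isEmpty_iff] at hc; subst hc
        rw [pv_go_spaces t h]; rfl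
      · cases t with
        | nil => rfl
        | cons a rt =>
            simp only [PySem.Chars.split₀.go, h a (by simp), if_true, hc]
            simpa using pv_go_spaces rt (fun c hc => h c (by simp [hc])) [cur.reverse]
  | cons c rest ih =>
      simp only [List.cons_append, PySem.Chars.split₀.go]
      split
      · split
        · exact ih _
        · rw [pv_go_acc (rest ++ t) [] _, pv_go_acc rest [] _, ih []]
      · exact ih _

theorem pv_go_dropWhile (s) :
    PySem.Chars.split₀.go (List.dropWhile PySem.Chars.isspace s) [] [] = PySem.Chars.split₀.go s [] [] := by
  induction s with
  | nil => rfl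
  | cons c rest ih =>
      by_cases hc : PySem.Chars.isspace c
      · simp only [List.dropWhile_cons, hc, if_true, ih, PySem.Chars.split₀.go, List.isEmpty_nil]
      · simp [hc]

-- stripping does not change the whitespace split
theorem pv_split_strip (s : List Char) :
    PySem.Chars.split₀ (PySem.Chars.strip s) = PySem.Chars.split₀ s := by
  unfold PySem.Chars.strip PySem.Chars.rstrip PySem.Chars.lstrip PySem.Chars.split₀
  have hdecomp : (List.dropWhile PySem.Chars.isspace (List.dropWhile PySem.Chars.isspace s).reverse).reverse
      ++ (List.takeWhile PySem.Chars.isspace (List.dropWhile PySem.Chars.isspace s).reverse).reverse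
      = List.dropWhile PySem.Chars.isspace s := by
    rw [← List.reverse_append, List.takeWhile_append_dropWhile, List.reverse_reverse]
  have hsp : ∀ c ∈ (List.takeWhile PySem.Chars.isspace (List.dropWhile PySem.Chars.isspace s).reverse).reverse,
      PySem.Chars.isspace c := by
    intro c hc
    simp only [List.mem_reverse] at hc
    exact List.mem_takeWhile_imp hc
  calc PySem.Chars.split₀.go (List.dropWhile PySem.Chars.isspace (List.dropWhile PySem.Chars.isspace s).reverse).reverse [] []
      = PySem.Chars.split₀.go ((List.dropWhile PySem.Chars.isspace (List.dropWhile PySem.Chars.isspace s).reverse).reverse ++ (List.takeWhile PySem.Chars.isspace (List.dropWhile PySem.Chars.isspace s).reverse).reverse) [] [] := (pv_go_append_spaces _ _ [] hsp).symm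
    _ = PySem.Chars.split₀.go (List.dropWhile PySem.Chars.isspace s) [] [] := by rw [hdecomp]
    _ = PySem.Chars.split₀.go s [] [] := pv_go_dropWhile s

theorem pvKeep_of_isspace {c : Char} (h : PySem.Chars.isspace c = true) : pvKeep c = true := by
  by_contra hk
  simp only [pvKeep, Bool.not_eq_true, Bool.not_eq_false', List.contains_eq_mem, decide_eq_true_eq] at hk
  have : PySem.Chars.isspace c = false := by
    have hm : c ∈ ['a','e','i','o','u',','] := by simpa using hk
    fin_cases hm <;> decide
  simp [this] at h

-- filtering non-whitespace characters out commutes with the whitespace split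
-- (fully removed words become empty and are dropped)
theorem pv_go_filter (s cur : List Char) :
    PySem.Chars.split₀.go (s.filter pvKeep) (cur.filter pvKeep) [] =
      ((PySem.Chars.split₀.go s cur []).map (fun w => w.filter pvKeep)).filter (fun w => !w.isEmpty) := by
  induction s generalizing cur with
  | nil =>
      simp only [List.filter_nil, PySem.Chars.split₀.go]
      by_cases hc : cur.isEmpty
      · rw [List.isEmpty_iff] at hc; subst hc; simp
      · simp only [hc, List.reverse_nil]
        by_cases hf : (cur.filter pvKeep).isEmpty
        · simp [List.filter_reverse, List.isEmpty_iff.mp hf]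
        · simp only [hf]
          simp only [List.filter_reverse, List.isEmpty_iff] at hf ⊢
          simp [hf]
  | cons c rest ih =>
      by_cases hsp : PySem.Chars.isspace c
      · rw [List.filter_cons_of_pos (pvKeep_of_isspace hsp)]
        simp only [PySem.Chars.split₀.go, hsp, if_true]
        by_cases hc : cur.isEmpty
        · rw [List.isEmpty_iff] at hc; subst hc
          simp only [List.filter_nil, List.isEmpty_nil, if_true]
          exact ih []
        · simp only [hc]
          by_cases hf : (cur.filter pvKeep).isEmpty
          · simp only [hf, if_true]
            rw [pv_go_acc rest [] [cur.reverse]]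
            have := ih []
            simp only [List.filter_nil] at this
            rw [this]
            simp [List.filter_reverse, List.isEmpty_iff.mp hf]
          · simp only [hf]
            rw [pv_go_acc (rest.filter pvKeep) [] [(cur.filter pvKeep).reverse],
                pv_go_acc rest [] [cur.reverse]]
            have := ih []
            simp only [List.filter_nil] at this
            rw [this]
            simp only [List.isEmpty_eq_false_iff] at hf
            simp [List.filter_reverse, hf]
      · by_cases hk : pvKeep c
        · rw [List.filter_cons_of_pos hk]
          simp only [PySem.Chars.split₀.go, hsp, Bool.false_eq_true, if_false]
          have : c :: cur.filter pvKeep = (c :: cur).filter pvKeep := by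
            rw [List.filter_cons_of_pos hk]
          rw [this, ih (c :: cur)]
        · rw [List.filter_cons_of_neg (by simp [hk])]
          simp only [PySem.Chars.split₀.go, hsp, Bool.false_eq_true, if_false]
          have : cur.filter pvKeep = (c :: cur).filter pvKeep := by
            rw [List.filter_cons_of_neg (by simp [hk])]
          rw [this, ih (c :: cur)]

-- digits of ' '.join(parts) are the digits of the parts
theorem pv_countP_join (l : List (List Char)) :
    (PySem.Chars.join " ".toList l).countP PySem.Chars.isdigit
      = (l.map (List.countP PySem.Chars.isdigit)).sum := by
  induction l with
  | nil => rfl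
  | cons a t ih =>
      cases t with
      | nil => simp [PySem.Chars.join, List.intercalate]
      | cons b t' =>
          have hstep : PySem.Chars.join " ".toList (a :: b :: t')
              = a ++ (" ".toList ++ PySem.Chars.join " ".toList (b :: t')) := rfl
          rw [hstep]
          simp only [List.countP_append, ih]
          simp [List.sum_cons]
          decide

-- empty words are already excluded by isalnum
theorem pv_filter_nonempty_isalnum (l : List (List Char)) :
    (l.filter (fun w => !w.isEmpty)).filter (fun w => PySem.Chars.strIsalnum w)
      = l.filter (fun w => PySem.Chars.strIsalnum w) := by
  rw [List.filter_filter]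
  apply List.filter_congr
  intro w _
  simp only [PySem.Chars.strIsalnum]
  cases h : w.isEmpty <;> simp [h]

theorem pv_sum_filter_map (l : List (List Char)) (q : List Char → Bool) (f : List Char → Nat) :
    ((l.filter q).map f).sum = (l.map (fun w => if q w then f w else 0)).sum := by
  induction l with
  | nil => rfl
  | cons a t ih =>
      by_cases h : q a <;> simp [h, ih]

-- ===== VERDICT (by name: the statement is the Claim_ definition above) =====
theorem practical_1_spec : Claim_equal_practical_1 := by
  intro sentence _
  unfold Spec_practical_1 practical_1 practical_1_alt
  simp only []
  -- A's character loop builds the filtered list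
  rw [show (fun acc ele => if !(("aeiou,".toList).contains ele) then acc ++ [ele] else acc)
        = (fun (acc : List Char) ele => if pvKeep ele then acc ++ [ele] else acc) from rfl,
      PySem.List.foldl_append_if_eq_filter]
  -- A's digit loop is a count
  rw [PySem.List.foldl_if_add_one]
  -- strip commutes away, the filter commutes with the split
  rw [List.nil_append, pv_split_strip]
  have hfil : PySem.Chars.split₀ ((PySem.Chars.strip sentence.toList).filter pvKeep)
      = ((PySem.Chars.split₀ sentence.toList).map (fun w => w.filter pvKeep)).filter (fun w => !w.isEmpty) := by
    have := pv_go_filter (PySem.Chars.strip sentence.toList) []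
    simp only [List.filter_nil] at this
    unfold PySem.Chars.split₀
    rw [this]
    have h2 : PySem.Chars.split₀.go (PySem.Chars.strip sentence.toList) [] []
        = PySem.Chars.split₀.go sentence.toList [] [] := pv_split_strip sentence.toList
    rw [h2]
  rw [hfil, pv_filter_nonempty_isalnum, pv_countP_join,
      pv_sum_filter_map _ _ _, List.map_map]
  -- B's word loop is a sum
  have hkeep : (fun ch => !(("aeiou,".toList).contains ch)) = pvKeep := rfl
  simp only [hkeep]
  have hB : List.foldl
      (fun (total : Int) word =>
        if PySem.Chars.strIsalnum (List.filter pvKeep word) = true then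
          total + (List.countP PySem.Chars.isdigit (List.filter pvKeep word) : Int)
        else total)
      0 (PySem.Chars.split₀ sentence.toList)
    = 0 + ((PySem.Chars.split₀ sentence.toList).map
        (fun word => if PySem.Chars.strIsalnum (List.filter pvKeep word) = true then
          (List.countP PySem.Chars.isdigit (List.filter pvKeep word) : Int) else 0)).sum := by
    rw [PySem.List.foldl_congr_mem (PySem.Chars.split₀ sentence.toList)
          (fun (total : Int) word =>
            if PySem.Chars.strIsalnum (List.filter pvKeep word) = true then
              total + (List.countP PySem.Chars.isdigit (List.filter pvKeep word) : Int)
            else total)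
          (fun (total : Int) word =>
            total + (if PySem.Chars.strIsalnum (List.filter pvKeep word) = true then
              (List.countP PySem.Chars.isdigit (List.filter pvKeep word) : Int) else 0))
          0
          (by intro acc x _
              by_cases h : PySem.Chars.strIsalnum (List.filter pvKeep x) <;> simp [h]),
        PySem.List.foldl_add]
  rw [hB, Nat.cast_list_sum, List.map_map]
  rw [zero_add, zero_add]
  congr 1
  apply List.map_congr_left
  intro w _
  simp only [Function.comp_apply]
  by_cases h : PySem.Chars.strIsalnum (List.filter pvKeep w) <;> simp [h]
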